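-- pv_equiv track=rewrite | github.com/valengobet/algo1-valengobet | TPS/CMS/CMS2/mesetaMasLarga.py | separaMesetas
-- ===== SOURCE A (Python) =====
-- from typing import List
--
-- def separaMesetas(l: List[int]) -> List[List[int]]:
--   i = 0
--   e = 0
--   lista_mesetas: List[List[int]] = []
--   while i < len(l):
--     if i == 0:
--       lista_mesetas = lista_mesetas + [[]]
--       lista_mesetas[e] = lista_mesetas[e] + [l[0]]
--       i += 1
--     else:
--       if l[i] == l[i-1]:
--         lista_mesetas[e] = lista_mesetas[e] + [l[i]]
--         i += 1
--       else:
--         lista_mesetas = lista_mesetas + [[]]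
--         e += 1
--         lista_mesetas[e] = lista_mesetas[e] + [l[i]]
--         i +=1
--   return lista_mesetas
-- ===== SOURCE B (Python) =====
-- from typing import List
--
-- def separaMesetas(l: List[int]) -> List[List[int]]:
--   res: List[List[int]] = []
--   for x in reversed(l):
--     if res and x == res[0][0]:
--       res = [[x] + res[0]] + res[1:]
--     else:
--       res = [[x]] + res
--   return res
-- ===== Notes on version B (the rewrite author's own statement) =====
-- stated objective: simpler
-- what changed: Replaces the index-driven while loop that grows the run list at the end and mutates the run at index e with a single right-to-left fold that prepends to the front run, removing all index bookkeeping (i, e).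
import Mathlib
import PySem

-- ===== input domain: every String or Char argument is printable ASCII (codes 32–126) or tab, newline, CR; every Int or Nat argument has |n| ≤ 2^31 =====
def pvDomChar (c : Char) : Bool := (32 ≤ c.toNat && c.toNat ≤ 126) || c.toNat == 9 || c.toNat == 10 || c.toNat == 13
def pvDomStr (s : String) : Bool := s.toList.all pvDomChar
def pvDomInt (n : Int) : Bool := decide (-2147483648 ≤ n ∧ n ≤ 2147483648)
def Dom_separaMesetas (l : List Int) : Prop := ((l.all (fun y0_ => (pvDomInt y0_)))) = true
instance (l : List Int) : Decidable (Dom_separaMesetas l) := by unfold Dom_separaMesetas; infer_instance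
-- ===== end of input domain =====

-- B replaces A's index-driven while loop (counters i, e, append-at-end, set-at-index)
-- with a single right-to-left fold prepending to the front run: simpler, no index bookkeeping.

-- ===== PORT A =====
-- while loop of A: state (i, e, lista_mesetas); all list indices are in range when read,
-- so getD/set transcribe l[i] and lista_mesetas[e] = … exactly.
def sepGo (l : List Int) (i e : Nat) (acc : List (List Int)) : List (List Int) :=
  if _h : i < l.length then
    if i = 0 then
      let acc1 := acc ++ [[]]
      let acc2 := acc1.set e (acc1.getD e [] ++ [l.getD 0 0])
      sepGo l (i+1) e acc2
    else
      if l.getD i 0 = l.getD (i-1) 0 then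
        sepGo l (i+1) e (acc.set e (acc.getD e [] ++ [l.getD i 0]))
      else
        let acc1 := acc ++ [[]]
        let e1 := e + 1
        sepGo l (i+1) e1 (acc1.set e1 (acc1.getD e1 [] ++ [l.getD i 0]))
  else acc
termination_by l.length - i

def separaMesetas (l : List Int) : List (List Int) := sepGo l 0 0 []

-- ===== PORT B =====
-- Source B: for x in reversed(l): prepend-or-extend the front run  ==  List.foldr
def separaMesetas_alt (l : List Int) : List (List Int) :=
  l.foldr (fun x res =>
    match res with
    | (y :: g) :: rest => if x = y then (x :: y :: g) :: rest else [x] :: (y :: g) :: rest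
    | _ => [x] :: res) []

-- ===== PRECONDITION & SPEC =====
def Spec_separaMesetas (l : List Int) (out : List (List Int)) : Prop := out = separaMesetas_alt l
instance (l : List Int) (out : List (List Int)) : Decidable (Spec_separaMesetas l out) := by unfold Spec_separaMesetas; infer_instance

-- ===== CLAIM (what is proved, stated in full; the proofs are below) =====
def Claim_equal_separaMesetas : Prop := ∀ (l : List Int), Dom_separaMesetas l → Spec_separaMesetas l (separaMesetas l)

-- ===== LEMMAS AND PROOFS =====

-- canonical description of run-splitting with a known previous element p:
-- (extension of the current run, list of later runs)
def go (p : Int) (xs : List Int) : List Int × List (List Int) :=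
  match xs with
  | [] => ([], [])
  | x :: rest =>
      let r := go x rest
      if x = p then (x :: r.1, r.2) else ([], (x :: r.1) :: r.2)

lemma sepGo_stop (l : List Int) (i e : Nat) (acc : List (List Int))
    (h : ¬ i < l.length) : sepGo l i e acc = acc := by
  unfold sepGo; simp [h]

lemma sepGo_eq (l : List Int) :
    ∀ (xs : List Int) (i : Nat) (acc : List (List Int)) (g : List Int),
      1 ≤ i → l.drop i = xs →
      sepGo l i acc.length (acc ++ [g]) =
        acc ++ ((g ++ (go (l.getD (i-1) 0) xs).1) :: (go (l.getD (i-1) 0) xs).2) := by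
  intro xs
  induction xs with
  | nil =>
      intro i acc g hi hd
      have hlen : l.length ≤ i := by
        by_contra h
        have := List.drop_eq_nil_iff.mp hd
        omega
      rw [sepGo_stop l i acc.length (acc ++ [g]) (by omega)]
      simp [go]
  | cons x rest ih =>
      intro i acc g hi hd
      have hlt : i < l.length := by
        by_contra h
        rw [List.drop_eq_nil_of_le (by omega)] at hd
        simp at hd
      have hx : l.getD i 0 = x := by
        have : (l.drop i).getD 0 0 = x := by rw [hd]; rfl
        simpa [List.getD, List.getElem?_drop] using this
      have hdrop : l.drop (i+1) = rest := by
        have : (l.drop i).drop 1 = rest := by rw [hd]; rfl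
        simpa [List.drop_drop, Nat.add_comm] using this
      have hne : i ≠ 0 := by omega
      have hgetDacc : (acc ++ [g]).getD acc.length [] = g := by
        simp [List.getD]
      unfold sepGo
      simp only [hlt, dif_pos, hne, if_false, hx]
      by_cases hcmp : x = l.getD (i-1) 0
      · rw [if_pos hcmp, hgetDacc]
        have hset : (acc ++ [g]).set acc.length (g ++ [x]) = acc ++ [g ++ [x]] := by
          rw [List.set_append_right _ _ (le_refl _)]
          simp
        rw [hset]
        have := ih (i+1) acc (g ++ [x]) (by omega) hdrop
        simp only [Nat.add_sub_cancel] at this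
        rw [this, hx]
        simp [go, hcmp, List.append_assoc]
      · rw [if_neg hcmp]
        simp only [List.getD] at hcmp
        have hset : ((acc ++ [g]) ++ [[]]).set (acc.length + 1)
            ((((acc ++ [g]) ++ [[]]).getD (acc.length + 1) []) ++ [x])
            = (acc ++ [g]) ++ [[x]] := by
          have hg : ((acc ++ [g]) ++ [[]]).getD (acc.length + 1) [] = [] := by
            simp [List.getD]
          rw [hg]
          rw [List.set_append_right _ _ (by simp)]
          simp
        have hlen1 : acc.length + 1 = (acc ++ [g]).length := by simp
        rw [hset]
        have := ih (i+1) (acc ++ [g]) [x] (by omega) hdrop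
        simp only [Nat.add_sub_cancel] at this
        rw [hlen1, this, hx]
        simp [go, hcmp]

lemma alt_go (l : List Int) :
    separaMesetas_alt l =
      match l with
      | [] => []
      | x :: xs => (x :: (go x xs).1) :: (go x xs).2 := by
  induction l with
  | nil => rfl
  | cons x xs ih =>
      cases xs with
      | nil => rfl
      | cons y ys =>
          show (match separaMesetas_alt (y :: ys) with
                | (z :: g) :: rest => if x = z then (x :: z :: g) :: rest else [x] :: (z :: g) :: rest
                | _ => [x] :: separaMesetas_alt (y :: ys)) = _
          rw [ih]
          by_cases hxy : x = y <;> simp [go, hxy] <;> by_cases h : y = x <;>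
            simp_all

-- ===== VERDICT (by name: the statement is the Claim_ definition above) =====
theorem separaMesetas_spec : Claim_equal_separaMesetas := by
  intro l _
  unfold Spec_separaMesetas
  cases l with
  | nil =>
      rw [show separaMesetas [] = [] from sepGo_stop [] 0 0 [] (by simp)]
      rfl
  | cons x xs =>
      rw [alt_go]
      show sepGo (x :: xs) 0 0 [] = _
      unfold sepGo
      simp only [List.length_cons, Nat.succ_pos, dif_pos]
      have h0 : (([] : List (List Int)) ++ [[]]).set 0
          ((([] : List (List Int)) ++ [[]]).getD 0 [] ++ [(x :: xs).getD 0 0]) = [[x]] := by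
        simp [List.getD]
      rw [h0]
      have := sepGo_eq (x :: xs) xs 1 [] [x] (le_refl 1) (by rfl)
      simpa using this
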